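-- pv_equiv track=rewrite | github.com/janvanwassenhove/mITyStudio | backend/app/services/soundfont_service.py | _categorize_soundfont
-- ===== SOURCE A (Python) =====
-- def _categorize_soundfont(sf2_name: str) -> tuple[str, str]:
--     """Categorize SoundFont based on filename"""
--     # Clean up name for instrument
--     instrument_name = sf2_name.replace(' ', '_').replace('-', '_').lower()
--
--     # Determine category
--     if any(word in sf2_name for word in ['piano', 'keyboard', 'organ', 'synth']):
--         category = 'keyboards'
--     elif any(word in sf2_name for word in ['guitar', 'bass', 'violin', 'cello', 'string']):
--         category = 'strings'
--     elif any(word in sf2_name for word in ['drum', 'percussion', 'beat']):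
--         category = 'percussion'
--     elif any(word in sf2_name for word in ['brass', 'trumpet', 'trombone', 'horn']):
--         category = 'brass'
--     elif any(word in sf2_name for word in ['flute', 'clarinet', 'sax', 'woodwind']):
--         category = 'woodwinds'
--     elif any(word in sf2_name for word in ['voice', 'choir', 'vocal']):
--         category = 'vocal'
--     else:
--         category = 'other'
--
--     return category, instrument_name
-- ===== SOURCE B (Python) =====
-- CATEGORY_NAMES = ['keyboards', 'strings', 'percussion', 'brass', 'woodwinds', 'vocal']
--
-- KEYWORD_PRIORITY = {
--     'piano': 0, 'keyboard': 0, 'organ': 0, 'synth': 0,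
--     'guitar': 1, 'bass': 1, 'violin': 1, 'cello': 1, 'string': 1,
--     'drum': 2, 'percussion': 2, 'beat': 2,
--     'brass': 3, 'trumpet': 3, 'trombone': 3, 'horn': 3,
--     'flute': 4, 'clarinet': 4, 'sax': 4, 'woodwind': 4,
--     'voice': 5, 'choir': 5, 'vocal': 5,
-- }
--
--
-- def _categorize_soundfont(sf2_name: str) -> tuple[str, str]:
--     instrument_name = sf2_name.replace(' ', '_').replace('-', '_').lower()
--     # single left-to-right scan over the string, keeping the best (lowest)
--     # priority of any keyword that starts at the current position
--     best = len(CATEGORY_NAMES)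
--     for i in range(len(sf2_name)):
--         for kw, pri in KEYWORD_PRIORITY.items():
--             if pri < best and sf2_name.startswith(kw, i):
--                 best = pri
--     category = CATEGORY_NAMES[best] if best < len(CATEGORY_NAMES) else 'other'
--     return category, instrument_name
-- ===== Notes on version B (the rewrite author's own statement) =====
-- stated objective: alternative
-- what changed: Replaces A's six per-group substring-search tests (if/elif over 'word in sf2_name') by a single left-to-right scan over the string positions that keeps the minimum priority of any keyword starting at each position, then maps that priority to a category name.
import Mathlib
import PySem

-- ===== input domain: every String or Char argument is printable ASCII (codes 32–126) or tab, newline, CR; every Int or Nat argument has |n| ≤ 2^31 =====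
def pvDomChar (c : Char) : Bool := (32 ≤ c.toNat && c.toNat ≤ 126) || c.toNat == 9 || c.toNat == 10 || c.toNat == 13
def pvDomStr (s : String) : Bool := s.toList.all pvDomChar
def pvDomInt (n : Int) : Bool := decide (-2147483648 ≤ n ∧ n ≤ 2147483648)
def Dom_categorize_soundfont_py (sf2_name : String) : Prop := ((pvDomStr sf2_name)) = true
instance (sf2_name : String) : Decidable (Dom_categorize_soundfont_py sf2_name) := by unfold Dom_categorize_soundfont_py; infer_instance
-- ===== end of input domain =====

-- B replaces A's per-keyword substring searches and if/elif chain by a single left-to-right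
-- scan over the string positions keeping the lowest-priority keyword match (alternative).

-- ===== PORT A =====
def categorize_soundfont_py (sf2_name : String) : String × String :=
  let instrument_name := PySem.Str.lower (PySem.Str.replace (PySem.Str.replace sf2_name " " "_") "-" "_")
  let category :=
    if (["piano", "keyboard", "organ", "synth"]).any (fun word => PySem.Str.isIn word sf2_name) then
      "keyboards"
    else if (["guitar", "bass", "violin", "cello", "string"]).any (fun word => PySem.Str.isIn word sf2_name) then
      "strings"
    else if (["drum", "percussion", "beat"]).any (fun word => PySem.Str.isIn word sf2_name) then
      "percussion"
    else if (["brass", "trumpet", "trombone", "horn"]).any (fun word => PySem.Str.isIn word sf2_name) then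
      "brass"
    else if (["flute", "clarinet", "sax", "woodwind"]).any (fun word => PySem.Str.isIn word sf2_name) then
      "woodwinds"
    else if (["voice", "choir", "vocal"]).any (fun word => PySem.Str.isIn word sf2_name) then
      "vocal"
    else
      "other"
  (category, instrument_name)

-- ===== PORT B =====
-- CATEGORY_NAMES of Source B
def pvCatNames : List String :=
  ["keyboards", "strings", "percussion", "brass", "woodwinds", "vocal"]

-- KEYWORD_PRIORITY of Source B (insertion-ordered items of the dict)
def pvKeywords : List (String × Nat) :=
  [("piano", 0), ("keyboard", 0), ("organ", 0), ("synth", 0),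
   ("guitar", 1), ("bass", 1), ("violin", 1), ("cello", 1), ("string", 1),
   ("drum", 2), ("percussion", 2), ("beat", 2),
   ("brass", 3), ("trumpet", 3), ("trombone", 3), ("horn", 3),
   ("flute", 4), ("clarinet", 4), ("sax", 4), ("woodwind", 4),
   ("voice", 5), ("choir", 5), ("vocal", 5)]

-- sf2_name.startswith(kw, i): exact for 0 ≤ i (the only offsets Source B uses)
def pvStartswithAt (cs : List Char) (kw : String) (i : Nat) : Bool :=
  kw.toList.isPrefixOf (cs.drop i)

-- the nested for-loop of Source B over range(len(sf2_name)) × KEYWORD_PRIORITY.items()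
def pvScan (cs : List Char) : Nat :=
  (List.range cs.length).foldl
    (fun best i =>
      pvKeywords.foldl
        (fun b kp => if kp.2 < b ∧ pvStartswithAt cs kp.1 i then kp.2 else b)
        best)
    6

def categorize_soundfont_py_alt (sf2_name : String) : String × String :=
  let instrument_name := PySem.Str.lower (PySem.Str.replace (PySem.Str.replace sf2_name " " "_") "-" "_")
  let best := pvScan sf2_name.toList
  ((if best < 6 then pvCatNames.getD best "other" else "other"), instrument_name)

-- ===== PRECONDITION & SPEC =====
def Spec_categorize_soundfont_py (sf2_name : String) (out : String × String) : Prop := out = categorize_soundfont_py_alt sf2_name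
instance (sf2_name : String) (out : String × String) : Decidable (Spec_categorize_soundfont_py sf2_name out) := by unfold Spec_categorize_soundfont_py; infer_instance

-- ===== CLAIM (what is proved, stated in full; the proofs are below) =====
def Claim_equal_categorize_soundfont_py : Prop := ∀ (sf2_name : String), Dom_categorize_soundfont_py sf2_name → Spec_categorize_soundfont_py sf2_name (categorize_soundfont_py sf2_name)

-- ===== LEMMAS AND PROOFS =====

-- generic "fold keeping the conditional minimum" characterisation
theorem foldl_minIf {α : Type} (f : α → Nat) (c : α → Bool) :
    ∀ (L : List α) (b : Nat),
      (L.foldl (fun b x => if f x < b ∧ c x = true then f x else b) b) ≤ b ∧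
      ((L.foldl (fun b x => if f x < b ∧ c x = true then f x else b) b) = b ∨
        ∃ x ∈ L, c x = true ∧ f x = (L.foldl (fun b x => if f x < b ∧ c x = true then f x else b) b)) ∧
      (∀ x ∈ L, c x = true → (L.foldl (fun b x => if f x < b ∧ c x = true then f x else b) b) ≤ f x) := by
  intro L
  induction L with
  | nil => intro b; simp
  | cons y L ih =>
    intro b
    simp only [List.foldl_cons]
    rcases ih (if f y < b ∧ c y = true then f y else b) with ⟨h1, h2, h3⟩
    by_cases hc : f y < b ∧ c y = true
    · rw [if_pos hc] at h1 h2 h3 ⊢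
      refine ⟨by omega, ?_, ?_⟩
      · rcases h2 with h2 | ⟨x, hx, hcx, hfx⟩
        · exact Or.inr ⟨y, List.mem_cons_self, hc.2, h2.symm⟩
        · exact Or.inr ⟨x, List.mem_cons_of_mem _ hx, hcx, hfx⟩
      · intro x hx hcx
        rcases List.mem_cons.mp hx with rfl | hx
        · omega
        · exact h3 x hx hcx
    · rw [if_neg hc] at h1 h2 h3 ⊢
      refine ⟨h1, ?_, ?_⟩
      · rcases h2 with h2 | ⟨x, hx, hcx, hfx⟩
        · exact Or.inl h2
        · exact Or.inr ⟨x, List.mem_cons_of_mem _ hx, hcx, hfx⟩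
      · intro x hx hcx
        rcases List.mem_cons.mp hx with rfl | hx
        · rcases Nat.lt_or_ge (f x) b with h | h
          · exact absurd ⟨h, hcx⟩ hc
          · omega
        · exact h3 x hx hcx

-- pvScan as a single fold over the flattened (position, keyword) pairs
def pvPairs (cs : List Char) : List (Nat × (String × Nat)) :=
  (List.range cs.length).flatMap (fun i => pvKeywords.map (fun kp => (i, kp)))

theorem pvScan_eq_pairs (cs : List Char) :
    pvScan cs = (pvPairs cs).foldl
      (fun b x => if x.2.2 < b ∧ pvStartswithAt cs x.2.1 x.1 = true then x.2.2 else b) 6 := by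
  unfold pvScan pvPairs
  rw [List.foldl_flatMap]
  simp [List.foldl_map]

theorem mem_pvPairs {cs : List Char} {x : Nat × (String × Nat)} :
    x ∈ pvPairs cs ↔ x.1 < cs.length ∧ x.2 ∈ pvKeywords := by
  unfold pvPairs
  rcases x with ⟨i, kp⟩
  simp only [List.mem_flatMap, List.mem_range, List.mem_map]
  constructor
  · rintro ⟨j, hj, kq, hkq, heq⟩
    cases heq; exact ⟨hj, hkq⟩
  · rintro ⟨hi, hkp⟩
    exact ⟨i, hi, kp, hkp, rfl⟩

-- matching somewhere inside the string ↔ Python's 'kw in s', for nonempty kw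
theorem startswithAt_iff (cs : List Char) (kw : String) (h : kw.toList ≠ []) :
    (∃ i, i < cs.length ∧ pvStartswithAt cs kw i = true) ↔ PySem.Chars.isIn kw.toList cs = true := by
  rw [PySem.Chars.isIn_iff_infix]
  simp only [pvStartswithAt, List.isPrefixOf_iff_prefix]
  constructor
  · rintro ⟨i, _, hp⟩
    exact List.infix_iff_prefix_suffix.mpr ⟨cs.drop i, hp, List.drop_suffix i cs⟩
  · intro hinf
    have := (PySem.Chars.exists_prefix_drop_iff_isIn (s := cs) (sub := kw.toList)).mpr
      ((PySem.Chars.isIn_iff_infix _ _).mpr hinf)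
    rcases this with ⟨j, hj⟩
    refine ⟨j, ?_, hj⟩
    by_contra hge
    have hnil : cs.drop j = [] := List.drop_eq_nil_of_le (by omega)
    rw [hnil] at hj
    exact h (List.prefix_nil.mp hj)

-- the A-side keyword group of priority k
def pvGroup : Nat → List String
  | 0 => ["piano", "keyboard", "organ", "synth"]
  | 1 => ["guitar", "bass", "violin", "cello", "string"]
  | 2 => ["drum", "percussion", "beat"]
  | 3 => ["brass", "trumpet", "trombone", "horn"]
  | 4 => ["flute", "clarinet", "sax", "woodwind"]
  | 5 => ["voice", "choir", "vocal"]
  | _ => []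

-- the full characterisation of pvScan used in the verdict
theorem pvScan_spec (cs : List Char) :
    pvScan cs ≤ 6 ∧
    (pvScan cs = 6 ∨ ∃ kp ∈ pvKeywords, PySem.Chars.isIn kp.1.toList cs = true ∧ kp.2 = pvScan cs) ∧
    (∀ kp ∈ pvKeywords, PySem.Chars.isIn kp.1.toList cs = true → pvScan cs ≤ kp.2) := by
  have hne : ∀ kp ∈ pvKeywords, kp.1.toList ≠ [] := by decide
  rw [pvScan_eq_pairs]
  rcases foldl_minIf (fun x : Nat × (String × Nat) => x.2.2)
      (fun x => pvStartswithAt cs x.2.1 x.1) (pvPairs cs) 6 with ⟨h1, h2, h3⟩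
  refine ⟨h1, ?_, ?_⟩
  · rcases h2 with h2 | ⟨x, hx, hcx, hfx⟩
    · exact Or.inl h2
    · rcases mem_pvPairs.mp hx with ⟨hi, hkp⟩
      refine Or.inr ⟨x.2, hkp, ?_, hfx⟩
      exact (startswithAt_iff cs x.2.1 (hne _ hkp)).mp ⟨x.1, hi, hcx⟩
  · intro kp hkp hin
    rcases (startswithAt_iff cs kp.1 (hne _ hkp)).mpr hin with ⟨i, hi, hsw⟩
    exact h3 (i, kp) (mem_pvPairs.mpr ⟨hi, hkp⟩) hsw

-- ===== VERDICT (by name: the statement is the Claim_ definition above) =====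
theorem categorize_soundfont_py_spec : Claim_equal_categorize_soundfont_py := by
  intro s _
  unfold Spec_categorize_soundfont_py
  have hgrp : ∀ kp ∈ pvKeywords, kp.2 < 6 ∧ kp.1 ∈ pvGroup kp.2 := by decide
  have hrev : ∀ k, k < 6 → ∀ w ∈ pvGroup k, (w, k) ∈ pvKeywords := by decide
  rcases pvScan_spec s.toList with ⟨h1, h2, h3⟩
  have hM : ∀ k, k < 6 → (pvGroup k).any (fun w => PySem.Str.isIn w s) = true →
      pvScan s.toList ≤ k := by
    intro k hk hany
    rcases List.any_eq_true.mp hany with ⟨w, hw, hin⟩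
    rw [PySem.Str.isIn_eq] at hin
    exact h3 (w, k) (hrev k hk w hw) hin
  have hN : pvScan s.toList < 6 →
      (pvGroup (pvScan s.toList)).any (fun w => PySem.Str.isIn w s) = true := by
    intro hr
    rcases h2 with h2 | ⟨kp, hkp, hin, hp⟩
    · omega
    · rcases hgrp kp hkp with ⟨_, hmem⟩
      refine List.any_eq_true.mpr ⟨kp.1, hp ▸ hmem, ?_⟩
      rw [PySem.Str.isIn_eq]
      exact hin
  simp only [categorize_soundfont_py, categorize_soundfont_py_alt, Prod.mk.injEq]
  refine ⟨?_, trivial⟩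
  generalize hg : pvScan s.toList = r at h1 hM hN
  interval_cases r
  · have m0 := hN (by norm_num)
    simp only [pvGroup] at m0
    rw [if_pos m0]
    rfl
  · have m1 := hN (by norm_num)
    have m0 : ¬ (((pvGroup 0).any fun w => PySem.Str.isIn w s) = true) :=
      fun h => by have := hM 0 (by norm_num) h; omega
    simp only [pvGroup] at m0 m1
    rw [if_neg m0, if_pos m1]
    rfl
  · have m2 := hN (by norm_num)
    have m0 : ¬ (((pvGroup 0).any fun w => PySem.Str.isIn w s) = true) :=
      fun h => by have := hM 0 (by norm_num) h; omega
    have m1 : ¬ (((pvGroup 1).any fun w => PySem.Str.isIn w s) = true) :=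
      fun h => by have := hM 1 (by norm_num) h; omega
    simp only [pvGroup] at m0 m1 m2
    rw [if_neg m0, if_neg m1, if_pos m2]
    rfl
  · have m3 := hN (by norm_num)
    have m0 : ¬ (((pvGroup 0).any fun w => PySem.Str.isIn w s) = true) :=
      fun h => by have := hM 0 (by norm_num) h; omega
    have m1 : ¬ (((pvGroup 1).any fun w => PySem.Str.isIn w s) = true) :=
      fun h => by have := hM 1 (by norm_num) h; omega
    have m2 : ¬ (((pvGroup 2).any fun w => PySem.Str.isIn w s) = true) :=
      fun h => by have := hM 2 (by norm_num) h; omega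
    simp only [pvGroup] at m0 m1 m2 m3
    rw [if_neg m0, if_neg m1, if_neg m2, if_pos m3]
    rfl
  · have m4 := hN (by norm_num)
    have m0 : ¬ (((pvGroup 0).any fun w => PySem.Str.isIn w s) = true) :=
      fun h => by have := hM 0 (by norm_num) h; omega
    have m1 : ¬ (((pvGroup 1).any fun w => PySem.Str.isIn w s) = true) :=
      fun h => by have := hM 1 (by norm_num) h; omega
    have m2 : ¬ (((pvGroup 2).any fun w => PySem.Str.isIn w s) = true) :=
      fun h => by have := hM 2 (by norm_num) h; omega
    have m3 : ¬ (((pvGroup 3).any fun w => PySem.Str.isIn w s) = true) :=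
      fun h => by have := hM 3 (by norm_num) h; omega
    simp only [pvGroup] at m0 m1 m2 m3 m4
    rw [if_neg m0, if_neg m1, if_neg m2, if_neg m3, if_pos m4]
    rfl
  · have m5 := hN (by norm_num)
    have m0 : ¬ (((pvGroup 0).any fun w => PySem.Str.isIn w s) = true) :=
      fun h => by have := hM 0 (by norm_num) h; omega
    have m1 : ¬ (((pvGroup 1).any fun w => PySem.Str.isIn w s) = true) :=
      fun h => by have := hM 1 (by norm_num) h; omega
    have m2 : ¬ (((pvGroup 2).any fun w => PySem.Str.isIn w s) = true) :=
      fun h => by have := hM 2 (by norm_num) h; omega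
    have m3 : ¬ (((pvGroup 3).any fun w => PySem.Str.isIn w s) = true) :=
      fun h => by have := hM 3 (by norm_num) h; omega
    have m4 : ¬ (((pvGroup 4).any fun w => PySem.Str.isIn w s) = true) :=
      fun h => by have := hM 4 (by norm_num) h; omega
    simp only [pvGroup] at m0 m1 m2 m3 m4 m5
    rw [if_neg m0, if_neg m1, if_neg m2, if_neg m3, if_neg m4, if_pos m5]
    rfl
  ·
    have m0 : ¬ (((pvGroup 0).any fun w => PySem.Str.isIn w s) = true) :=
      fun h => by have := hM 0 (by norm_num) h; omega
    have m1 : ¬ (((pvGroup 1).any fun w => PySem.Str.isIn w s) = true) :=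
      fun h => by have := hM 1 (by norm_num) h; omega
    have m2 : ¬ (((pvGroup 2).any fun w => PySem.Str.isIn w s) = true) :=
      fun h => by have := hM 2 (by norm_num) h; omega
    have m3 : ¬ (((pvGroup 3).any fun w => PySem.Str.isIn w s) = true) :=
      fun h => by have := hM 3 (by norm_num) h; omega
    have m4 : ¬ (((pvGroup 4).any fun w => PySem.Str.isIn w s) = true) :=
      fun h => by have := hM 4 (by norm_num) h; omega
    have m5 : ¬ (((pvGroup 5).any fun w => PySem.Str.isIn w s) = true) :=
      fun h => by have := hM 5 (by norm_num) h; omega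
    simp only [pvGroup] at m0 m1 m2 m3 m4 m5
    rw [if_neg m0, if_neg m1, if_neg m2, if_neg m3, if_neg m4, if_neg m5]
    rfl
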